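-- pv_equiv track=rewrite | github.com/Mayank3603/Topics-in-Cryptanalysis | A3/part3.py | apply_pbox
-- ===== SOURCE A (Python) =====
-- def int_to_bitlist(num, width=16):
--     """Convert an integer to a list of bits (MSB first)."""
--     return [(num >> (width - 1 - i)) & 1 for i in range(width)]
--
-- def bitlist_to_int(bitlist):
--     """Convert a list of bits (MSB first) back into an integer."""
--     result = 0
--     for bit in bitlist:
--         result = (result << 1) | bit
--     return result
--
-- def apply_pbox(input_val):
--     """
--     Permute a 16-bit integer using the fixed P-box.
--     The permutation mapping is hard-coded.
--     """
--     PBOX = [0, 4, 8, 12,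
--             1, 5, 9, 13,
--             2, 6, 10, 14,
--             3, 7, 11, 15]
--     bits = int_to_bitlist(input_val)
--     permuted_bits = [0] * 16
--     for idx, pos in enumerate(PBOX):
--         permuted_bits[pos] = bits[idx]
--     return bitlist_to_int(permuted_bits)
-- ===== SOURCE B (Python) =====
-- def apply_pbox(input_val):
--     """
--     Permute a 16-bit integer using the fixed P-box.
--     Single pass over the P-box, assembling the result integer directly:
--     bit read MSB-first from position idx is written at bit weight 2**(15 - pos).
--     """
--     PBOX = [0, 4, 8, 12,
--             1, 5, 9, 13,
--             2, 6, 10, 14,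
--             3, 7, 11, 15]
--     result = 0
--     for idx, pos in enumerate(PBOX):
--         result += ((input_val >> (15 - idx)) & 1) << (15 - pos)
--     return result
-- ===== Notes on version B (the rewrite author's own statement) =====
-- stated objective: simpler
-- what changed: Replaced A's three list passes (build an MSB-first bit list, scatter it through the P-box into a second list, fold that list back into an integer) with a single loop over the P-box that assembles the result integer directly with shifts and masks, with no intermediate lists.
import Mathlib
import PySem

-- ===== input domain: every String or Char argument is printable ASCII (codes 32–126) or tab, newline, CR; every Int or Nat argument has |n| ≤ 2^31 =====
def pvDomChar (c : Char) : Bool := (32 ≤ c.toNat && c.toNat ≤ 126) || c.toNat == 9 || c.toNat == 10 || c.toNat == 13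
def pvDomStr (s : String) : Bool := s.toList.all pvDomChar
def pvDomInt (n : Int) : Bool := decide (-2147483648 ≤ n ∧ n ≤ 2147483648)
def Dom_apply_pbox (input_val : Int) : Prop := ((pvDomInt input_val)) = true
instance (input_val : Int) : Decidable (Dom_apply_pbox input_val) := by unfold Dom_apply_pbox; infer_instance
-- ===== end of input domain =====

-- B replaces A's three list passes (bit list, scatter, horner fold) by one loop over the P-box
-- that assembles the result integer directly; objective: simpler (return value equal; no caller-visible mutation).

-- ===== PORT A =====
-- int_to_bitlist(num, width=16): [(num >> (width-1-i)) & 1 for i in range(width)]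
-- (.toNat on the shift amount is exact: 0 ≤ width-1-i for every i in range(width) at the call width=16)
def int_to_bitlist (num : Int) (width : Int) : List Int :=
  (PySem.List.pyRange 0 width 1).map (fun i => PySem.Int.band (num >>> (width - 1 - i).toNat) 1)

-- bitlist_to_int: result = (result << 1) | bit over the list
def bitlist_to_int (bitlist : List Int) : Int :=
  bitlist.foldl (fun result bit => PySem.Int.bor (result <<< (1:Nat)) bit) 0

-- apply_pbox: bits, scatter permuted_bits[pos] = bits[idx] (List.set/pyGetD are exact here:
-- 0 ≤ idx,pos < 16 for every entry of PBOX), then bitlist_to_int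
def apply_pbox (input_val : Int) : Int :=
  let PBOX : List Int := [0, 4, 8, 12, 1, 5, 9, 13, 2, 6, 10, 14, 3, 7, 11, 15]
  let bits := int_to_bitlist input_val 16
  let permuted := (PySem.List.enumerate PBOX 0).foldl
    (fun permuted p => permuted.set p.2.toNat (PySem.List.pyGetD bits p.1 0)) (List.replicate 16 0)
  bitlist_to_int permuted

-- ===== PORT B =====
-- one loop: result += ((input_val >> (15-idx)) & 1) << (15-pos)
-- (.toNat on both shift amounts is exact: 0 ≤ 15-idx and 0 ≤ 15-pos for every entry of PBOX)
def apply_pbox_alt (input_val : Int) : Int :=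
  let PBOX : List Int := [0, 4, 8, 12, 1, 5, 9, 13, 2, 6, 10, 14, 3, 7, 11, 15]
  (PySem.List.enumerate PBOX 0).foldl
    (fun result p =>
      result + ((PySem.Int.band (input_val >>> (15 - p.1).toNat) 1) <<< (15 - p.2).toNat)) 0

-- ===== PRECONDITION & SPEC =====
def Spec_apply_pbox (input_val : Int) (out : Int) : Prop := out = apply_pbox_alt input_val
instance (input_val : Int) (out : Int) : Decidable (Spec_apply_pbox input_val out) := by unfold Spec_apply_pbox; infer_instance

-- ===== CLAIM (what is proved, stated in full; the proofs are below) =====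
def Claim_equal_apply_pbox : Prop := ∀ (input_val : Int), Dom_apply_pbox input_val → Spec_apply_pbox input_val (apply_pbox input_val)

-- ===== LEMMAS AND PROOFS =====
theorem shr_int (m : Int) (k : Nat) : m >>> ((k:Nat):Int) = m / ((2^k : Nat) : Int) := by
  rw [Int.shiftRight_natCast_right, Int.shiftRight_eq_div_pow]

theorem shl_int (m : Int) (k : Nat) : m <<< ((k:Nat):Int) = m * ((2^k : Nat) : Int) := by
  rw [Int.shiftLeft_natCast_right, Int.shiftLeft_eq]; push_cast; ring

theorem shr0 (m : Int) : m >>> (0:Int) = m / 1 := by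
  rw [show (0:Int) = ((0:Nat):Int) by norm_num, shr_int]; norm_num

theorem shl0 (m : Int) : m <<< (0:Int) = m * 1 := by
  rw [show (0:Int) = ((0:Nat):Int) by norm_num, shl_int]; norm_num

theorem shr1 (m : Int) : m >>> (1:Int) = m / 2 := by
  rw [show (1:Int) = ((1:Nat):Int) by norm_num, shr_int]; norm_num

theorem shl1 (m : Int) : m <<< (1:Int) = m * 2 := by
  rw [show (1:Int) = ((1:Nat):Int) by norm_num, shl_int]; norm_num

theorem shr2 (m : Int) : m >>> (2:Int) = m / 4 := by
  rw [show (2:Int) = ((2:Nat):Int) by norm_num, shr_int]; norm_num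

theorem shl2 (m : Int) : m <<< (2:Int) = m * 4 := by
  rw [show (2:Int) = ((2:Nat):Int) by norm_num, shl_int]; norm_num

theorem shr3 (m : Int) : m >>> (3:Int) = m / 8 := by
  rw [show (3:Int) = ((3:Nat):Int) by norm_num, shr_int]; norm_num

theorem shl3 (m : Int) : m <<< (3:Int) = m * 8 := by
  rw [show (3:Int) = ((3:Nat):Int) by norm_num, shl_int]; norm_num

theorem shr4 (m : Int) : m >>> (4:Int) = m / 16 := by
  rw [show (4:Int) = ((4:Nat):Int) by norm_num, shr_int]; norm_num

theorem shl4 (m : Int) : m <<< (4:Int) = m * 16 := by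
  rw [show (4:Int) = ((4:Nat):Int) by norm_num, shl_int]; norm_num

theorem shr5 (m : Int) : m >>> (5:Int) = m / 32 := by
  rw [show (5:Int) = ((5:Nat):Int) by norm_num, shr_int]; norm_num

theorem shl5 (m : Int) : m <<< (5:Int) = m * 32 := by
  rw [show (5:Int) = ((5:Nat):Int) by norm_num, shl_int]; norm_num

theorem shr6 (m : Int) : m >>> (6:Int) = m / 64 := by
  rw [show (6:Int) = ((6:Nat):Int) by norm_num, shr_int]; norm_num

theorem shl6 (m : Int) : m <<< (6:Int) = m * 64 := by
  rw [show (6:Int) = ((6:Nat):Int) by norm_num, shl_int]; norm_num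

theorem shr7 (m : Int) : m >>> (7:Int) = m / 128 := by
  rw [show (7:Int) = ((7:Nat):Int) by norm_num, shr_int]; norm_num

theorem shl7 (m : Int) : m <<< (7:Int) = m * 128 := by
  rw [show (7:Int) = ((7:Nat):Int) by norm_num, shl_int]; norm_num

theorem shr8 (m : Int) : m >>> (8:Int) = m / 256 := by
  rw [show (8:Int) = ((8:Nat):Int) by norm_num, shr_int]; norm_num

theorem shl8 (m : Int) : m <<< (8:Int) = m * 256 := by
  rw [show (8:Int) = ((8:Nat):Int) by norm_num, shl_int]; norm_num

theorem shr9 (m : Int) : m >>> (9:Int) = m / 512 := by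
  rw [show (9:Int) = ((9:Nat):Int) by norm_num, shr_int]; norm_num

theorem shl9 (m : Int) : m <<< (9:Int) = m * 512 := by
  rw [show (9:Int) = ((9:Nat):Int) by norm_num, shl_int]; norm_num

theorem shr10 (m : Int) : m >>> (10:Int) = m / 1024 := by
  rw [show (10:Int) = ((10:Nat):Int) by norm_num, shr_int]; norm_num

theorem shl10 (m : Int) : m <<< (10:Int) = m * 1024 := by
  rw [show (10:Int) = ((10:Nat):Int) by norm_num, shl_int]; norm_num

theorem shr11 (m : Int) : m >>> (11:Int) = m / 2048 := by
  rw [show (11:Int) = ((11:Nat):Int) by norm_num, shr_int]; norm_num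

theorem shl11 (m : Int) : m <<< (11:Int) = m * 2048 := by
  rw [show (11:Int) = ((11:Nat):Int) by norm_num, shl_int]; norm_num

theorem shr12 (m : Int) : m >>> (12:Int) = m / 4096 := by
  rw [show (12:Int) = ((12:Nat):Int) by norm_num, shr_int]; norm_num

theorem shl12 (m : Int) : m <<< (12:Int) = m * 4096 := by
  rw [show (12:Int) = ((12:Nat):Int) by norm_num, shl_int]; norm_num

theorem shr13 (m : Int) : m >>> (13:Int) = m / 8192 := by
  rw [show (13:Int) = ((13:Nat):Int) by norm_num, shr_int]; norm_num

theorem shl13 (m : Int) : m <<< (13:Int) = m * 8192 := by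
  rw [show (13:Int) = ((13:Nat):Int) by norm_num, shl_int]; norm_num

theorem shr14 (m : Int) : m >>> (14:Int) = m / 16384 := by
  rw [show (14:Int) = ((14:Nat):Int) by norm_num, shr_int]; norm_num

theorem shl14 (m : Int) : m <<< (14:Int) = m * 16384 := by
  rw [show (14:Int) = ((14:Nat):Int) by norm_num, shl_int]; norm_num

theorem shr15 (m : Int) : m >>> (15:Int) = m / 32768 := by
  rw [show (15:Int) = ((15:Nat):Int) by norm_num, shr_int]; norm_num

theorem shl15 (m : Int) : m <<< (15:Int) = m * 32768 := by
  rw [show (15:Int) = ((15:Nat):Int) by norm_num, shl_int]; norm_num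

theorem nat_two_mul_lor_one (m : Nat) : 2 * m ||| 1 = 2 * m + 1 := by
  simpa [Nat.bit_false_apply, Nat.bit_true_apply] using Nat.lor_bit false m true 0

theorem bor_step (r b : Int) (hr : 0 ≤ r) (hb : 0 ≤ b ∧ b < 2) :
    PySem.Int.bor (r <<< (1:Nat)) b = 2 * r + b := by
  have h2 : r <<< (1:Nat) = 2 * r := by simp [Int.shiftLeft_eq]; ring
  rw [h2, PySem.Int.bor_of_nonneg (by omega) hb.1]
  have hb' : b = 0 ∨ b = 1 := by omega
  rcases hb' with h | h <;> subst h
  · simp; omega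
  · have h3 : (2 * r).toNat = 2 * r.toNat := by omega
    simp [h3, nat_two_mul_lor_one]; omega

-- A's horner fold over a list of 0/1 bits equals the plain 2*acc+bit fold.
theorem horner_eq : ∀ (l : List Int), (∀ b ∈ l, 0 ≤ b ∧ b < 2) → ∀ r, 0 ≤ r →
    l.foldl (fun result bit => PySem.Int.bor (result <<< (1:Nat)) bit) r =
    l.foldl (fun result bit => 2 * result + bit) r
  | [], _, _, _ => rfl
  | x :: l, h, r, hr => by
    have hx := h x (by simp)
    simp only [List.foldl_cons, bor_step r x hr hx]
    exact horner_eq l (fun b hb => h b (by simp [hb])) _ (by omega)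

theorem band_one_bit (x : Int) : PySem.Int.band x 1 = x % 2 := by
  rw [PySem.Int.band_one, PySem.Int.mod_eq_emod_of_pos (by norm_num)]

theorem band_one_bounds (x : Int) : 0 ≤ PySem.Int.band x 1 ∧ PySem.Int.band x 1 < 2 := by
  rw [band_one_bit]; omega

set_option maxHeartbeats 1600000 in
theorem apply_pbox_eq_alt (n : Int) : apply_pbox n = apply_pbox_alt n := by
  simp only [apply_pbox, apply_pbox_alt, int_to_bitlist, bitlist_to_int,
    PySem.List.enumerate, PySem.List.pyGetD,
    show PySem.List.pyRange 0 16 1 = [0,1,2,3,4,5,6,7,8,9,10,11,12,13,14,15] from by decide,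
    List.map]
  simp [-List.foldl_cons, -List.foldl_nil]
  rw [horner_eq _ (by
    intro b hb
    simp at hb
    rcases hb with rfl | rfl | rfl | rfl | rfl | rfl | rfl | rfl | rfl | rfl | rfl | rfl | rfl | rfl | rfl | rfl <;> exact band_one_bounds _) 0 le_rfl]
  simp [List.set, PySem.List.pyGet?, PySem.List.pyIdx?]
  simp only [band_one_bit, Int.shiftRight_eq_div_pow, shr0, shr1, shr2, shr3, shr4, shr5, shr6, shr7, shr8, shr9, shr10, shr11, shr12, shr13, shr14, shr15, shl0, shl1, shl2, shl3, shl4, shl5, shl6, shl7, shl8, shl9, shl10, shl11, shl12, shl13, shl14, shl15]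
  push_cast
  norm_num
  omega

-- ===== VERDICT (by name: the statement is the Claim_ definition above) =====
theorem apply_pbox_spec : Claim_equal_apply_pbox := by
  intro input_val _
  unfold Spec_apply_pbox
  exact apply_pbox_eq_alt input_val
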